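-- pv_equiv track=rewrite | github.com/Luminarada80/Manim | genetic_algorithm.py | find_node_start_end
-- ===== SOURCE A (Python) =====
-- def find_node_start_end(individual):
--     # Finds the start and stop of where each node's rule is in the individual
--     node_indices = []
--     node_start_end = []
--     for i, node in enumerate(individual):
--         # Find the length of the node
--         node_length = len(node)
--
--         # Get the start of the node as either 0 (start) or right after the previous node
--         if len(node_indices) != 0:
--             node_start = sum(node_indices)+1
--         else:
--             node_start = 1
--
--         # Get the end of the node as the sum of the previous nodes plus the node length
--         node_end = sum(node_indices) + node_length
--         node_indices.append(node_length)
--         node_start_end.append((node_start, node_end))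
--
--     return node_start_end
-- ===== SOURCE B (Python) =====
-- def find_node_start_end(individual):
--     result = []
--     acc = 0
--     for node in individual:
--         result.append((acc + 1, acc + len(node)))
--         acc += len(node)
--     return result
-- ===== Notes on version B (the rewrite author's own statement) =====
-- stated objective: simpler
-- what changed: Replaced re-summing the list of previous node lengths (and the redundant empty-list branch) each iteration with a single running prefix-sum accumulator.
import Mathlib
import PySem

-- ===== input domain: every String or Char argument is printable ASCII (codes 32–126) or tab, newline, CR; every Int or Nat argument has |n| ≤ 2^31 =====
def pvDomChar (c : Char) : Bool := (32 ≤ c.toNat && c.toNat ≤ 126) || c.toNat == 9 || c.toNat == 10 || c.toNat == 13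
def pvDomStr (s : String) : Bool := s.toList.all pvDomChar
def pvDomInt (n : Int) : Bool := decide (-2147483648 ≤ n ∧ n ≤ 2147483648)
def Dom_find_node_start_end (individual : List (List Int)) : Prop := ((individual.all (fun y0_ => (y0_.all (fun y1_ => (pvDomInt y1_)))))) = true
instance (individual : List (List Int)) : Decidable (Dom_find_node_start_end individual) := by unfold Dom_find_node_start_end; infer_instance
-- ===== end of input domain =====

-- B replaces A's per-iteration re-summing of all previous node lengths by one running
-- prefix-sum accumulator (objective: simpler, one pass without the list of lengths).

-- ===== PORT A =====
-- loop over `individual`, carrying node_indices (lengths of already-seen nodes) and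
-- emitting (node_start, node_end) for each node, as in A's for-loop
def pvALoop (xs : List (List Int)) (node_indices : List Int) : List (Int × Int) :=
  match xs with
  | [] => []
  | node :: rest =>
    let node_length : Int := (node.length : Int)
    let node_start : Int :=
      if node_indices.length ≠ 0 then node_indices.sum + 1 else 1
    let node_end : Int := node_indices.sum + node_length
    (node_start, node_end) :: pvALoop rest (node_indices ++ [node_length])

def find_node_start_end (individual : List (List Int)) : List (Int × Int) :=
  pvALoop individual []

-- ===== PORT B =====
def pvBLoop (xs : List (List Int)) (acc : Int) : List (Int × Int) :=
  match xs with
  | [] => []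
  | node :: rest =>
    (acc + 1, acc + (node.length : Int)) :: pvBLoop rest (acc + (node.length : Int))

def find_node_start_end_alt (individual : List (List Int)) : List (Int × Int) :=
  pvBLoop individual 0

-- ===== PRECONDITION & SPEC =====
def Spec_find_node_start_end (individual : List (List Int)) (out : List (Int × Int)) : Prop := out = find_node_start_end_alt individual
instance (individual : List (List Int)) (out : List (Int × Int)) : Decidable (Spec_find_node_start_end individual out) := by unfold Spec_find_node_start_end; infer_instance

-- ===== CLAIM (what is proved, stated in full; the proofs are below) =====
def Claim_equal_find_node_start_end : Prop := ∀ (individual : List (List Int)), Dom_find_node_start_end individual → Spec_find_node_start_end individual (find_node_start_end individual)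

-- ===== LEMMAS AND PROOFS =====
theorem pvALoop_eq_pvBLoop (xs : List (List Int)) (ni : List Int) :
    pvALoop xs ni = pvBLoop xs ni.sum := by
  induction xs generalizing ni with
  | nil => rfl
  | cons node rest ih =>
    simp only [pvALoop, pvBLoop]
    rw [ih]
    rcases ni with _ | ⟨a, t⟩ <;> simp <;> ring_nf

-- ===== VERDICT (by name: the statement is the Claim_ definition above) =====
theorem find_node_start_end_spec : Claim_equal_find_node_start_end := by
  intro individual _
  unfold Spec_find_node_start_end find_node_start_end find_node_start_end_alt
  simpa using pvALoop_eq_pvBLoop individual []
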